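-- pv_equiv track=rewrite | github.com/sgbalogh/esb.py | esb/StatementFeatures.py | __word_within_open_brackets
-- ===== SOURCE A (Python) =====
-- def __word_within_open_brackets(sentence,i):
--     opened = False
--     for x in range(0,i):
--         if sentence[x] == "[":
--             opened = True
--         elif sentence[x] == "]":
--             opened = False
--     return opened
-- ===== SOURCE B (Python) =====
-- def __word_within_open_brackets(sentence, i):
--     # Scan backwards from i-1: the nearest preceding bracket decides.
--     for x in range(i - 1, -1, -1):
--         c = sentence[x]
--         if c == "[":
--             return True
--         if c == "]":
--             return False
--     return False
-- ===== Notes on version B (the rewrite author's own statement) =====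
-- stated objective: alternative
-- what changed: Replaces the full forward pass accumulating an opened flag with a backward scan from i-1 that returns immediately at the nearest preceding bracket.
import Mathlib
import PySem

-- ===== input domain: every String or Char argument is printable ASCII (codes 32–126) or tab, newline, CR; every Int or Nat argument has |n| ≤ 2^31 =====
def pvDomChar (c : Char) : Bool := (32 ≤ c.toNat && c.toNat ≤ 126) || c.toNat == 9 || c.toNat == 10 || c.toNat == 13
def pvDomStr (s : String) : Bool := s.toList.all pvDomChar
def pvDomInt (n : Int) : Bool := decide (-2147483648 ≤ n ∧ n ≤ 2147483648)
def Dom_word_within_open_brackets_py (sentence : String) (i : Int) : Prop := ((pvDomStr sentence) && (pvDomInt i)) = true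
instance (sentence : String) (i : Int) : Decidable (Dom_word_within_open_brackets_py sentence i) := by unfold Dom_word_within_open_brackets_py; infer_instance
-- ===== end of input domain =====

-- B replaces A's forward pass accumulating an 'opened' flag with a backward scan
-- from i-1 that decides at the nearest preceding bracket (objective: alternative).

-- ===== PORT A =====
def word_within_open_brackets_py (sentence : String) (i : Int) : Bool :=
  (PySem.List.pyRange 0 i 1).foldl
    (fun opened x =>
      if PySem.Str.pyGet? sentence x = some '[' then true
      else if PySem.Str.pyGet? sentence x = some ']' then false
      else opened) false

-- ===== PORT B =====
-- backward scan: j counts the remaining positions, current index is j-1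
def pvScanBack (cs : List Char) : Nat → Bool
  | 0 => false
  | j+1 =>
    match cs[j]? with
    | some '[' => true
    | some ']' => false
    | _ => pvScanBack cs j

def word_within_open_brackets_py_alt (sentence : String) (i : Int) : Bool :=
  pvScanBack sentence.toList i.toNat

-- ===== PRECONDITION & SPEC =====
-- Pre_ excludes exactly the inputs where Python A raises IndexError: i beyond the string length.
def Pre_word_within_open_brackets_py (sentence : String) (i : Int) : Prop :=
  i ≤ (sentence.toList.length : Int)
instance (sentence : String) (i : Int) : Decidable (Pre_word_within_open_brackets_py sentence i) := by
  unfold Pre_word_within_open_brackets_py; infer_instance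

def pvWitness_word_within_open_brackets_py : String × Int := ("a [b] c", 4)

def Spec_word_within_open_brackets_py (sentence : String) (i : Int) (out : Bool) : Prop :=
  out = word_within_open_brackets_py_alt sentence i
instance (sentence : String) (i : Int) (out : Bool) : Decidable (Spec_word_within_open_brackets_py sentence i out) := by
  unfold Spec_word_within_open_brackets_py; infer_instance

-- ===== CLAIM (what is proved, stated in full; the proofs are below) =====
def Claim_equal_word_within_open_brackets_py : Prop := ∀ (sentence : String) (i : Int), Dom_word_within_open_brackets_py sentence i → Pre_word_within_open_brackets_py sentence i → Spec_word_within_open_brackets_py sentence i (word_within_open_brackets_py sentence i)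

-- ===== LEMMAS AND PROOFS =====

theorem pvScanBack_eq (s : String) (n : Nat) :
    (PySem.List.pyRange 0 (n : Int) 1).foldl
      (fun opened x =>
        if PySem.Str.pyGet? s x = some '[' then true
        else if PySem.Str.pyGet? s x = some ']' then false
        else opened) false
    = pvScanBack s.toList n := by
  induction n with
  | zero => simp [PySem.List.pyRange_one_eq_nil, pvScanBack]
  | succ n ih =>
    have h : ((n + 1 : Nat) : Int) = (n : Int) + 1 := by push_cast; ring
    rw [h, PySem.List.pyRange_one_succ_right (by positivity), List.foldl_append]
    simp only [List.foldl_cons, List.foldl_nil, PySem.Str.pyGet?_natCast]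
    rw [ih]
    rcases hc : s.toList[n]? with _ | c
    · simp [pvScanBack, hc]
    · by_cases h1 : c = '['
      · simp [pvScanBack, hc, h1]
      · by_cases h2 : c = ']'
        · simp [pvScanBack, hc, h2]
        · simp [pvScanBack, hc, h1, h2]

-- ===== VERDICT (by name: the statement is the Claim_ definition above) =====
theorem word_within_open_brackets_py_spec : Claim_equal_word_within_open_brackets_py := by
  intro sentence i _ _
  unfold Spec_word_within_open_brackets_py word_within_open_brackets_py word_within_open_brackets_py_alt
  by_cases hi : 0 ≤ i
  · have : i = ((i.toNat : Nat) : Int) := (Int.toNat_of_nonneg hi).symm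
    rw [this, pvScanBack_eq, Int.toNat_natCast]
  · have h0 : i.toNat = 0 := Int.toNat_of_nonpos (le_of_not_ge hi)
    rw [PySem.List.pyRange_one_eq_nil (by omega), h0]
    simp [pvScanBack]
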